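-- pv_equiv track=rewrite | github.com/pykmintin/Repo | Scripts/TaskBot/bot.py | generate_display_ids
-- ===== SOURCE A (Python) =====
-- def generate_display_ids(tasks, status='incomplete'):
--     display_map = {}
--
--     if status == 'completed':
--         for i, _ in enumerate(tasks):
--             display_map[i] = f"C{i+1}"
--     else:
--         normal_count = 1
--         high_count = 1
--         for i, task in enumerate(tasks):
--             if not task['completed']:
--                 if task['priority'] == 'high':
--                     display_map[i] = f"H{high_count}"
--                     high_count += 1
--                 else:
--                     display_map[i] = f"T{normal_count}"
--                     normal_count += 1
--
--     return display_map
-- ===== SOURCE B (Python) =====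
-- def generate_display_ids(tasks, status='incomplete'):
--     if status == 'completed':
--         return {i: f"C{i+1}" for i in range(len(tasks))}
--     high_idx = [i for i, t in enumerate(tasks)
--                 if not t['completed'] and t['priority'] == 'high']
--     normal_idx = [i for i, t in enumerate(tasks)
--                   if not t['completed'] and t['priority'] != 'high']
--     items = [(i, f"H{r+1}") for r, i in enumerate(high_idx)] + \
--             [(i, f"T{r+1}") for r, i in enumerate(normal_idx)]
--     return dict(sorted(items, key=lambda p: p[0]))
-- ===== Notes on version B (the rewrite author's own statement) =====
-- stated objective: alternative
-- what changed: Replaces A's single interleaved pass with two mutable counters by a group-then-number decomposition: collect the high and normal pending indices, number each group independently, and merge the labelled pairs back into index order with a key sort.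
import Mathlib
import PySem

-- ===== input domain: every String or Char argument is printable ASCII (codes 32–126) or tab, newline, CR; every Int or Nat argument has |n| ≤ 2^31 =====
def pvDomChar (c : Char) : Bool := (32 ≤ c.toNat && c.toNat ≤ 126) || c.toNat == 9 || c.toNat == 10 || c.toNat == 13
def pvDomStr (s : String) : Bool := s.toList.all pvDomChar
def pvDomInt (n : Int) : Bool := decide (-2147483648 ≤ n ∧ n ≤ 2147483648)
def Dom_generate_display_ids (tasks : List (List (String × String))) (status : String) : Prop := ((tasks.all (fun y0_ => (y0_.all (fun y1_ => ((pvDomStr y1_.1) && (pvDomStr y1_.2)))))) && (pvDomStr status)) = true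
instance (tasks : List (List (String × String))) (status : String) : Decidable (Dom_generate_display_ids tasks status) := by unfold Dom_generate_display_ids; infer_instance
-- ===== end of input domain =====

-- B replaces A's single interleaved counter pass by a group-then-number decomposition
-- (collect high/normal pending indices, number each group, merge by index); alternative, not faster.

-- ===== PORT A =====
-- tasks are Python dicts (assoc lists); task['completed'] / task['priority'] is ported as
-- (Dict.mk t).getD k "" — Pre_ below excludes exactly the inputs where Python raises KeyError,
-- so on admitted inputs the default "" is never used. `not task['completed']` is string
-- truthiness: true iff the value is "".
def generate_display_ids (tasks : List (List (String × String))) (status : String) : List (Int × String) :=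
  if status == "completed" then
    ((PySem.List.enumerate tasks).foldl
      (fun d p => d.insert p.1 ("C" ++ PySem.Int.toStr (p.1 + 1))) PySem.Dict.empty).items
  else
    (((PySem.List.enumerate tasks).foldl
      (fun s p =>
        if (PySem.Dict.mk p.2).getD "completed" "" == "" then
          if (PySem.Dict.mk p.2).getD "priority" "" == "high" then
            (s.1.insert p.1 ("H" ++ PySem.Int.toStr s.2.2), s.2.1, s.2.2 + 1)
          else
            (s.1.insert p.1 ("T" ++ PySem.Int.toStr s.2.1), s.2.1 + 1, s.2.2)
        else s)
      (PySem.Dict.empty, (1 : Int), (1 : Int))).1).items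

-- ===== PORT B =====
def generate_display_ids_alt (tasks : List (List (String × String))) (status : String) : List (Int × String) :=
  if status == "completed" then
    (PySem.Dict.ofList ((PySem.List.pyRange 0 tasks.length).map
      (fun i => (i, "C" ++ PySem.Int.toStr (i + 1))))).items
  else
    let high_idx := ((PySem.List.enumerate tasks).filter
      (fun p => (PySem.Dict.mk p.2).getD "completed" "" == "" &&
                (PySem.Dict.mk p.2).getD "priority" "" == "high")).map (·.1)
    let normal_idx := ((PySem.List.enumerate tasks).filter
      (fun p => (PySem.Dict.mk p.2).getD "completed" "" == "" &&
                !((PySem.Dict.mk p.2).getD "priority" "" == "high"))).map (·.1)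
    let items :=
      (PySem.List.enumerate high_idx).map (fun q => (q.2, "H" ++ PySem.Int.toStr (q.1 + 1))) ++
      (PySem.List.enumerate normal_idx).map (fun q => (q.2, "T" ++ PySem.Int.toStr (q.1 + 1)))
    (PySem.Dict.ofList (PySem.List.sorted items (fun p => p.1))).items

-- ===== PRECONDITION & SPEC =====
-- Pre_ excludes exactly the inputs where Python A raises KeyError: unless status == 'completed',
-- every task needs a 'completed' key, and every pending task (value "") needs a 'priority' key.
def Pre_generate_display_ids (tasks : List (List (String × String))) (status : String) : Prop :=
  status = "completed" ∨
    ∀ t ∈ tasks, ((PySem.Dict.mk t).get? "completed").isSome = true ∧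
      ((PySem.Dict.mk t).get? "completed" = some "" →
        ((PySem.Dict.mk t).get? "priority").isSome = true)
instance (tasks : List (List (String × String))) (status : String) : Decidable (Pre_generate_display_ids tasks status) := by unfold Pre_generate_display_ids; infer_instance

def pvWitness_generate_display_ids : (List (List (String × String))) × String :=
  ([[("completed", ""), ("priority", "high")], [("completed", "x")],
    [("completed", ""), ("priority", "low")], [("completed", ""), ("priority", "high")]],
   "incomplete")

def Spec_generate_display_ids (tasks : List (List (String × String))) (status : String) (out : List (Int × String)) : Prop := out = generate_display_ids_alt tasks status
instance (tasks : List (List (String × String))) (status : String) (out : List (Int × String)) : Decidable (Spec_generate_display_ids tasks status out) := by unfold Spec_generate_display_ids; infer_instance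

-- ===== CLAIM (what is proved, stated in full; the proofs are below) =====
def Claim_equal_generate_display_ids : Prop := ∀ (tasks : List (List (String × String))) (status : String), Dom_generate_display_ids tasks status → Pre_generate_display_ids tasks status → Spec_generate_display_ids tasks status (generate_display_ids tasks status)

-- ===== LEMMAS AND PROOFS =====

-- Reference description of A's else-branch output as a plain list recursion.
def gdiItemsA : List (List (String × String)) → Int → Int → Int → List (Int × String)
  | [], _, _, _ => []
  | t :: ts, i, n, h =>
    if (PySem.Dict.mk t).getD "completed" "" == "" then
      if (PySem.Dict.mk t).getD "priority" "" == "high" then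
        (i, "H" ++ PySem.Int.toStr h) :: gdiItemsA ts (i + 1) n (h + 1)
      else
        (i, "T" ++ PySem.Int.toStr n) :: gdiItemsA ts (i + 1) (n + 1) h
    else gdiItemsA ts (i + 1) n h

-- Indices (from i) of the tasks satisfying g.
def gdiIdxFrom (g : List (String × String) → Bool) : List (List (String × String)) → Int → List Int
  | [], _ => []
  | t :: ts, i => if g t then i :: gdiIdxFrom g ts (i + 1) else gdiIdxFrom g ts (i + 1)

-- Label a list of indices pre1, pre2, … starting at counter c.
def gdiLabel (pre : String) : List Int → Int → List (Int × String)
  | [], _ => []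
  | x :: xs, c => (x, pre ++ PySem.Int.toStr c) :: gdiLabel pre xs (c + 1)

theorem gdi_foldA (ts : List (List (String × String))) :
    ∀ (i n h : Int) (d : PySem.Dict Int String), d.keys.Nodup → (∀ k ∈ d.keys, k < i) →
    (((PySem.List.enumerate ts i).foldl
      (fun s p =>
        if (PySem.Dict.mk p.2).getD "completed" "" == "" then
          if (PySem.Dict.mk p.2).getD "priority" "" == "high" then
            (s.1.insert p.1 ("H" ++ PySem.Int.toStr s.2.2), s.2.1, s.2.2 + 1)
          else
            (s.1.insert p.1 ("T" ++ PySem.Int.toStr s.2.1), s.2.1 + 1, s.2.2)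
        else s)
      (d, n, h)).1).items = d.items ++ gdiItemsA ts i n h := by
  induction ts with
  | nil => intro i n h d _ _; simp [PySem.List.enumerate_nil, gdiItemsA]
  | cons t ts ih =>
    intro i n h d hnd hlt
    have hci : d.contains i = false := by
      rw [PySem.Dict.contains_eq_decide_mem_keys]
      simp only [decide_eq_false_iff_not]
      intro hmem; exact lt_irrefl i (hlt i hmem)
    rw [PySem.List.enumerate_cons, List.foldl_cons]
    by_cases hc : ((PySem.Dict.mk t).getD "completed" "" == "") = true
    · by_cases hp : ((PySem.Dict.mk t).getD "priority" "" == "high") = true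
      · simp only [hc, hp, if_true]
        rw [ih (i+1) n (h+1) (d.insert i ("H" ++ PySem.Int.toStr h))
            (by rw [PySem.Dict.keys_insert_of_not_contains d _ hci]
                simp only [List.nodup_append, List.nodup_cons]
                refine ⟨hnd, by simp, ?_⟩
                intro k hk; simp; intro hki; exact absurd hki (ne_of_lt (hlt k hk)))
            (by intro k hk
                rw [PySem.Dict.keys_insert_of_not_contains d _ hci] at hk
                rcases List.mem_append.mp hk with hk | hk
                · exact lt_trans (hlt k hk) (by omega)
                · simp at hk; omega)]
        rw [PySem.Dict.items_insert_of_not_contains d _ hci]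
        simp [gdiItemsA, hc, hp]
      · have hp' : ((PySem.Dict.mk t).getD "priority" "" == "high") = false := by
          simpa using hp
        simp only [hc, hp', if_true, Bool.false_eq_true, if_false]
        rw [ih (i+1) (n+1) h (d.insert i ("T" ++ PySem.Int.toStr n))
            (by rw [PySem.Dict.keys_insert_of_not_contains d _ hci]
                simp only [List.nodup_append, List.nodup_cons]
                refine ⟨hnd, by simp, ?_⟩
                intro k hk; simp; intro hki; exact absurd hki (ne_of_lt (hlt k hk)))
            (by intro k hk
                rw [PySem.Dict.keys_insert_of_not_contains d _ hci] at hk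
                rcases List.mem_append.mp hk with hk | hk
                · exact lt_trans (hlt k hk) (by omega)
                · simp at hk; omega)]
        rw [PySem.Dict.items_insert_of_not_contains d _ hci]
        simp [gdiItemsA, hc, hp']
    · have hc' : ((PySem.Dict.mk t).getD "completed" "" == "") = false := by simpa using hc
      simp only [hc', Bool.false_eq_true, if_false]
      rw [ih (i+1) n h d hnd (by intro k hk; exact lt_trans (hlt k hk) (by omega))]
      simp [gdiItemsA, hc']

theorem gdi_filterIdx (g : List (String × String) → Bool) (ts : List (List (String × String))) :
    ∀ i : Int, ((PySem.List.enumerate ts i).filter (fun p => g p.2)).map (·.1) = gdiIdxFrom g ts i := by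
  induction ts with
  | nil => intro i; simp [PySem.List.enumerate_nil, gdiIdxFrom]
  | cons t ts ih =>
    intro i
    rw [PySem.List.enumerate_cons, List.filter_cons]
    by_cases hg : g t = true
    · simp only [hg, if_true, List.map_cons, gdiIdxFrom, ih]
    · have hg' : g t = false := by simpa using hg
      simp only [hg', Bool.false_eq_true, if_false, gdiIdxFrom, ih]

theorem gdi_enumLabel (pre : String) (xs : List Int) :
    ∀ s : Int, (PySem.List.enumerate xs s).map (fun q => (q.2, pre ++ PySem.Int.toStr (q.1 + 1)))
      = gdiLabel pre xs (s + 1) := by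
  induction xs with
  | nil => intro s; simp [PySem.List.enumerate_nil, gdiLabel]
  | cons x xs ih => intro s; rw [PySem.List.enumerate_cons]; simp [gdiLabel, ih]

theorem gdi_perm (ts : List (List (String × String))) :
    ∀ i n h : Int, (gdiItemsA ts i n h).Perm
      (gdiLabel "H" (gdiIdxFrom (fun t => ((PySem.Dict.mk t).getD "completed" "" == "") &&
          ((PySem.Dict.mk t).getD "priority" "" == "high")) ts i) h ++
       gdiLabel "T" (gdiIdxFrom (fun t => ((PySem.Dict.mk t).getD "completed" "" == "") &&
          !((PySem.Dict.mk t).getD "priority" "" == "high")) ts i) n) := by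
  induction ts with
  | nil => intro i n h; simp [gdiItemsA, gdiIdxFrom, gdiLabel]
  | cons t ts ih =>
    intro i n h
    by_cases hc : ((PySem.Dict.mk t).getD "completed" "" == "") = true
    · by_cases hp : ((PySem.Dict.mk t).getD "priority" "" == "high") = true
      · simp only [gdiItemsA, gdiIdxFrom, hc, hp, Bool.and_self, if_true, Bool.not_true,
          Bool.and_false, Bool.false_eq_true, if_false, gdiLabel, List.cons_append]
        exact (ih (i+1) n (h+1)).cons _
      · have hp' : ((PySem.Dict.mk t).getD "priority" "" == "high") = false := by simpa using hp
        simp only [gdiItemsA, gdiIdxFrom, hc, hp', Bool.and_false, Bool.false_eq_true, if_false,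
          if_true, Bool.not_false, Bool.and_true, gdiLabel]
        exact ((ih (i+1) (n+1) h).cons _).trans List.perm_middle.symm
    · have hc' : ((PySem.Dict.mk t).getD "completed" "" == "") = false := by simpa using hc
      simp only [gdiItemsA, gdiIdxFrom, hc', Bool.false_and, Bool.false_eq_true, if_false]
      exact ih (i+1) n h

theorem gdi_le (ts : List (List (String × String))) :
    ∀ (i n h : Int) (q : Int × String), q ∈ gdiItemsA ts i n h → i ≤ q.1 := by
  induction ts with
  | nil => intro i n h q hq; simp [gdiItemsA] at hq
  | cons t ts ih =>
    intro i n h q hq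
    simp only [gdiItemsA] at hq
    split_ifs at hq with hc hp
    · rcases List.mem_cons.mp hq with rfl | hq
      · simp
      · have := ih (i+1) n (h+1) q hq; omega
    · rcases List.mem_cons.mp hq with rfl | hq
      · simp
      · have := ih (i+1) (n+1) h q hq; omega
    · have := ih (i+1) n h q hq; omega

theorem gdi_pairwise (ts : List (List (String × String))) :
    ∀ i n h : Int, (gdiItemsA ts i n h).Pairwise (fun a b => a.1 < b.1) := by
  induction ts with
  | nil => intro i n h; simp [gdiItemsA]
  | cons t ts ih =>
    intro i n h
    simp only [gdiItemsA]
    split_ifs with hc hp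
    · exact List.Pairwise.cons (fun q hq => by have := gdi_le ts (i+1) n (h+1) q hq; simpa using by omega) (ih (i+1) n (h+1))
    · exact List.Pairwise.cons (fun q hq => by have := gdi_le ts (i+1) (n+1) h q hq; simpa using by omega) (ih (i+1) (n+1) h)
    · exact ih (i+1) n h

theorem gdi_items_ofList {l : List (Int × String)} (hnd : (l.map (·.1)).Nodup) :
    (PySem.Dict.ofList l).items = l := by
  have h := PySem.Dict.items_foldl_insert_fresh l (fun a => a.1) (fun a => a.2)
    (PySem.Dict.empty) (fun a _ => PySem.Dict.contains_empty a.1) hnd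
  simpa using h

theorem gdi_nodup_fst_enumerate {α : Type} (xs : List α) (s : Int) :
    ((PySem.List.enumerate xs s).map (·.1)).Nodup := by
  rw [List.Nodup, List.pairwise_map]
  exact (PySem.List.pairwise_lt_enumerate xs s).imp (fun h => ne_of_lt h)

theorem gdi_main (tasks : List (List (String × String))) (status : String) :
    generate_display_ids tasks status = generate_display_ids_alt tasks status := by
  unfold generate_display_ids generate_display_ids_alt
  by_cases hs : (status == "completed") = true
  · simp only [hs, if_true]
    have hA := PySem.Dict.items_foldl_insert_fresh (PySem.List.enumerate tasks)
      (fun p => p.1) (fun p => "C" ++ PySem.Int.toStr (p.1 + 1)) PySem.Dict.empty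
      (fun a _ => PySem.Dict.contains_empty a.1) (gdi_nodup_fst_enumerate tasks 0)
    have hrange : PySem.List.pyRange 0 (tasks.length : Int) = (PySem.List.enumerate tasks).map (·.1) := by
      have := PySem.List.map_fst_enumerate tasks 0
      simpa using this.symm
    rw [hrange, gdi_items_ofList (by
      simpa [List.map_map, Function.comp_def] using gdi_nodup_fst_enumerate tasks 0)]
    rw [hA]
    simp [List.map_map, Function.comp_def, PySem.Dict.empty]
  · have hs' : (status == "completed") = false := by simpa using hs
    simp only [hs', Bool.false_eq_true, if_false]
    rw [gdi_foldA tasks 0 1 1 PySem.Dict.empty PySem.Dict.nodup_keys_empty (by simp [PySem.Dict.keys, PySem.Dict.empty])]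
    have hH := gdi_filterIdx (fun t => ((PySem.Dict.mk t).getD "completed" "" == "") &&
        ((PySem.Dict.mk t).getD "priority" "" == "high")) tasks 0
    have hN := gdi_filterIdx (fun t => ((PySem.Dict.mk t).getD "completed" "" == "") &&
        !((PySem.Dict.mk t).getD "priority" "" == "high")) tasks 0
    have hLH := gdi_enumLabel "H" (gdiIdxFrom (fun t => ((PySem.Dict.mk t).getD "completed" "" == "") &&
        ((PySem.Dict.mk t).getD "priority" "" == "high")) tasks 0) 0
    have hLN := gdi_enumLabel "T" (gdiIdxFrom (fun t => ((PySem.Dict.mk t).getD "completed" "" == "") &&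
        !((PySem.Dict.mk t).getD "priority" "" == "high")) tasks 0) 0
    rw [hH, hN, hLH, hLN]
    norm_num
    have hsorted : PySem.List.sorted
        (gdiLabel "H" (gdiIdxFrom (fun t => ((PySem.Dict.mk t).getD "completed" "" == "") &&
            ((PySem.Dict.mk t).getD "priority" "" == "high")) tasks 0) 1 ++
         gdiLabel "T" (gdiIdxFrom (fun t => ((PySem.Dict.mk t).getD "completed" "" == "") &&
            !((PySem.Dict.mk t).getD "priority" "" == "high")) tasks 0) 1)
        (fun p => p.1) = gdiItemsA tasks 0 1 1 :=
      PySem.List.sorted_eq_of_perm_of_pairwise_lt _ _ _ (gdi_perm tasks 0 1 1) (gdi_pairwise tasks 0 1 1)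
    rw [hsorted, gdi_items_ofList]
    · simp [PySem.Dict.empty]
    · rw [List.Nodup, List.pairwise_map]
      exact (gdi_pairwise tasks 0 1 1).imp (fun h => ne_of_lt h)

-- ===== VERDICT (by name: the statement is the Claim_ definition above) =====
theorem generate_display_ids_spec : Claim_equal_generate_display_ids := by
  intro tasks status _ _
  exact gdi_main tasks status
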